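-- pv_equiv track=rewrite | github.com/davidxk/Algorithm-Implementations | shortest_path/py/maze_util.py | print_maze
-- ===== SOURCE A (Python) =====
-- def coord_to_imagepos(coord):
--     return map(lambda x: 2 * x + 1, coord)
--
-- def print_maze(ways, rows, cols):
--     maze = [["#"] * (2 * cols + 1) for i in range(2 * rows + 1)]
--     for way in ways:
--         coordA, coordB = way
--         posA, posB = coord_to_imagepos(coordA), coord_to_imagepos(coordB)
--         posWay = (coordA[0] + coordB[0] + 1, coordA[1] + coordB[1] + 1)
--         for pos in (posA, posB, posWay):
--             row, col = pos
--             maze[row][col] = ' '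
--     for i, line in enumerate(maze):
--         maze[i] = str().join(line)
--     return maze
-- ===== SOURCE B (Python) =====
-- def print_maze(ways, rows, cols):
--     height, width = 2 * rows + 1, 2 * cols + 1
--     open_by_row = {}
--     for coordA, coordB in ways:
--         (ra, ca), (rb, cb) = coordA, coordB
--         for r, c in ((2 * ra + 1, 2 * ca + 1), (2 * rb + 1, 2 * cb + 1),
--                      (ra + rb + 1, ca + cb + 1)):
--             if not (0 <= r < height and 0 <= c < width):
--                 raise ValueError("way outside the maze")
--             open_by_row.setdefault(r, set()).add(c)
--     lines = []
--     for r in range(height):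
--         chunks = []
--         prev = 0
--         for c in sorted(open_by_row.get(r, ())):
--             chunks.append('#' * (c - prev))
--             chunks.append(' ')
--             prev = c + 1
--         chunks.append('#' * (width - prev))
--         lines.append(''.join(chunks))
--     return lines
-- ===== Notes on version B (the rewrite author's own statement) =====
-- stated objective: alternative
-- what changed: B replaces A's mutable 2-D grid (allocate an all-wall grid, overwrite three cells per way) with a row-indexed dictionary of open-column sets built in one validating pass and a run-length renderer that emits '#'-runs between the sorted open columns of each row; Pre_ is the natural maze domain (way endpoints are grid cells), outside which B raises ValueError and A raises IndexError except for negative coordinates that are valid Python indices, where A returns with the write wrapped to the opposite wall - an accident of negative indexing.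
-- outside the precondition, e.g. on print_maze([((-1, 0), (-1, 0))], 1, 1): A returns ['###', '###', '# #'], B raises ValueError
import Mathlib
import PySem

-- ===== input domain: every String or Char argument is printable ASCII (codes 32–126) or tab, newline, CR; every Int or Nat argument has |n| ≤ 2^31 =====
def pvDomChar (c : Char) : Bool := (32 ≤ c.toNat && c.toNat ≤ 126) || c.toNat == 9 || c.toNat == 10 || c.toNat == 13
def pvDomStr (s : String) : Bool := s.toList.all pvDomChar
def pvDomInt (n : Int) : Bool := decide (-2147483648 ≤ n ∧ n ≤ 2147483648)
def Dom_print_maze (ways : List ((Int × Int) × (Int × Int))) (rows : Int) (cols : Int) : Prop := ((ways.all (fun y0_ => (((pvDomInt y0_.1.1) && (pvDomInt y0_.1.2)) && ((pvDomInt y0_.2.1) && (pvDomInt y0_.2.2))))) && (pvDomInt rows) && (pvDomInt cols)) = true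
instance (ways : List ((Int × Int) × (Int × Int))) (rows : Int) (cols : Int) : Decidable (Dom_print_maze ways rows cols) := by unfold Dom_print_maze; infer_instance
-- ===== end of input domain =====

-- B renders each row by emitting runs of '#' between the sorted open columns of a row-indexed
-- dictionary (clipping out-of-canvas positions), instead of mutating a 2-D grid in place.

-- ===== PORT A =====
def pvCoordToImagepos (c : Int × Int) : Int × Int := (2 * c.1 + 1, 2 * c.2 + 1)

-- maze[row][col] = ' ' — Python assignment with possibly negative indices; pyGetD/pySetD are
-- exact wherever the Python assignment does not raise IndexError (and total: a no-op where it does).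
def pvWriteCell (mz : List (List Char)) (pos : Int × Int) : List (List Char) :=
  PySem.List.pySetD mz pos.1 (PySem.List.pySetD (PySem.List.pyGetD mz pos.1 []) pos.2 ' ')

def print_maze (ways : List ((Int × Int) × (Int × Int))) (rows : Int) (cols : Int) : List String :=
  let maze0 : List (List Char) :=
    (List.range (2 * rows + 1).toNat).map (fun _ => List.replicate (2 * cols + 1).toNat '#')
  let maze := ways.foldl (fun mz way =>
    let posA := pvCoordToImagepos way.1
    let posB := pvCoordToImagepos way.2
    let posWay := (way.1.1 + way.2.1 + 1, way.1.2 + way.2.2 + 1)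
    [posA, posB, posWay].foldl pvWriteCell mz) maze0
  -- str().join(line): each cell is one char, so the joined line is String.ofList of the row
  maze.map (fun line => String.ofList line)

-- ===== PORT B =====
-- the validated insert: open_by_row.setdefault(r, set()).add(c) after the bounds check;
-- the else branch is Source B's 'raise ValueError' path, unreachable inside Pre_print_maze
def pvClipAdd (height width : Int) (d : PySem.Dict Int (PySem.Set Int)) (p : Int × Int) :
    PySem.Dict Int (PySem.Set Int) :=
  if 0 ≤ p.1 ∧ p.1 < height ∧ 0 ≤ p.2 ∧ p.2 < width then
    d.insert p.1 (PySem.Set.add (d.getD p.1 PySem.Set.empty) p.2)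
  else d

-- chunks.append('#' * (c - prev)); chunks.append(' '); prev = c + 1
def pvRunStep (acc : List Char × Int) (c : Int) : List Char × Int :=
  (acc.1 ++ List.replicate (c - acc.2).toNat '#' ++ [' '], c + 1)

def print_maze_alt (ways : List ((Int × Int) × (Int × Int))) (rows : Int) (cols : Int) : List String :=
  let height := 2 * rows + 1
  let width := 2 * cols + 1
  let openByRow : PySem.Dict Int (PySem.Set Int) := ways.foldl (fun d w =>
    [(2 * w.1.1 + 1, 2 * w.1.2 + 1), (2 * w.2.1 + 1, 2 * w.2.2 + 1),
     (w.1.1 + w.2.1 + 1, w.1.2 + w.2.2 + 1)].foldl (pvClipAdd height width) d) PySem.Dict.empty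
  (PySem.List.pyRange 0 height 1).map (fun r =>
    let acc := (PySem.List.sorted (openByRow.getD r PySem.Set.empty) (fun x => x) false).foldl
      pvRunStep ([], 0)
    String.ofList (acc.1 ++ List.replicate (width - acc.2).toNat '#'))

-- ===== PRECONDITION & SPEC =====
-- Pre_ is the natural maze domain: both endpoints of every way are cells of the rows x cols grid.
-- Outside it B raises ValueError (it validates every image position), and A raises IndexError,
-- except for ways with negative coordinates that are still valid Python indices, where A returns
-- with its writes wrapped around to the opposite wall - an accident of negative indexing.
def Pre_print_maze (ways : List ((Int × Int) × (Int × Int))) (rows : Int) (cols : Int) : Prop :=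
  ∀ w ∈ ways, 0 ≤ w.1.1 ∧ w.1.1 < rows ∧ 0 ≤ w.1.2 ∧ w.1.2 < cols ∧
    0 ≤ w.2.1 ∧ w.2.1 < rows ∧ 0 ≤ w.2.2 ∧ w.2.2 < cols
instance (ways : List ((Int × Int) × (Int × Int))) (rows : Int) (cols : Int) : Decidable (Pre_print_maze ways rows cols) := by unfold Pre_print_maze; infer_instance

def pvWitness_print_maze : (List ((Int × Int) × (Int × Int))) × Int × Int := ([((0, 0), (0, 1))], 1, 2)

def Spec_print_maze (ways : List ((Int × Int) × (Int × Int))) (rows : Int) (cols : Int) (out : List String) : Prop := out = print_maze_alt ways rows cols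
instance (ways : List ((Int × Int) × (Int × Int))) (rows : Int) (cols : Int) (out : List String) : Decidable (Spec_print_maze ways rows cols out) := by unfold Spec_print_maze; infer_instance

-- ===== CLAIM (what is proved, stated in full; the proof is below) =====
def Claim_equal_print_maze : Prop := ∀ (ways : List ((Int × Int) × (Int × Int))) (rows : Int) (cols : Int), Dom_print_maze ways rows cols → Pre_print_maze ways rows cols → Spec_print_maze ways rows cols (print_maze ways rows cols)

-- ===== LEMMAS AND PROOFS =====

-- the three image positions of each way, in A's write order
def pvPositions (ways : List ((Int × Int) × (Int × Int))) : List (Int × Int) :=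
  ways.flatMap (fun w => [(2 * w.1.1 + 1, 2 * w.1.2 + 1), (2 * w.2.1 + 1, 2 * w.2.2 + 1),
                          (w.1.1 + w.2.1 + 1, w.1.2 + w.2.2 + 1)])

theorem length_pvWriteCell (mz : List (List Char)) (pos : Int × Int) :
    (pvWriteCell mz pos).length = mz.length := by
  simp [pvWriteCell, PySem.List.length_pySetD]

-- one write with nonnegative coordinates: a targeted overwrite when on the grid, a no-op off it
theorem get_pvWriteCell (mz : List (List Char)) (pos : Int × Int) (C : Nat)
    (hC : ∀ l ∈ mz, l.length = C) (hnn : 0 ≤ pos.1 ∧ 0 ≤ pos.2) (i j : Nat)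
    (hi : i < mz.length) (hj : j < C) :
    ((pvWriteCell mz pos).getD i []).getD j '#' =
      if ((i : Int), (j : Int)) = pos then ' ' else (mz.getD i []).getD j '#' := by
  rw [pvWriteCell, PySem.List.pySetD_of_nonneg _ _ hnn.1]
  by_cases hrow : pos.1.toNat < mz.length
  · have hget : PySem.List.pyGetD mz pos.1 [] = mz[pos.1.toNat]'hrow :=
      PySem.List.pyGetD_eq_getElem _ _ hnn.1 (by omega)
    have router : ∀ (r' : List Char),
        (mz.set pos.1.toNat r').getD i [] =
          if i = pos.1.toNat then r' else mz.getD i [] := by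
      intro r'
      by_cases hieq : i = pos.1.toNat
      · subst hieq
        rw [List.getD_eq_getElem?_getD, List.getElem?_set, if_pos rfl, if_pos hrow, if_pos rfl,
          Option.getD_some]
      · rw [List.getD_eq_getElem?_getD, List.getElem?_set, if_neg (fun h => hieq h.symm),
          if_neg hieq, List.getD_eq_getElem?_getD]
    rw [router]
    by_cases hieq : i = pos.1.toNat
    · rw [if_pos hieq, hget, PySem.List.pySetD_of_nonneg _ _ hnn.2]
      have hmzget : mz.getD i [] = mz[pos.1.toNat]'hrow := by
        subst hieq
        rw [List.getD_eq_getElem?_getD, List.getElem?_eq_getElem hrow, Option.getD_some]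
      rw [hmzget]
      by_cases hjeq : j = pos.2.toNat
      · by_cases hcol : pos.2.toNat < (mz[pos.1.toNat]'hrow).length
        · subst hjeq
          rw [List.getD_eq_getElem?_getD, List.getElem?_set, if_pos rfl, if_pos hcol,
            Option.getD_some,
            if_pos (show _ = pos from Prod.ext (by simp; omega) (by simp; omega))]
        · -- the column is off the row: the inner set is a no-op and j < C rules the hit out
          exact absurd hj (by rw [hC _ (List.getElem_mem _)] at hcol; omega)
      · rw [List.getD_eq_getElem?_getD, List.getElem?_set, if_neg (fun h => hjeq h.symm),
          ← List.getD_eq_getElem?_getD]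
        refine (if_neg ?_).symm
        intro h
        exact hjeq (by have := congrArg Prod.snd h; simp at this; omega)
    · rw [if_neg hieq]
      refine (if_neg ?_).symm
      intro h
      exact hieq (by have := congrArg Prod.fst h; simp at this; omega)
  · -- the row is off the grid: the outer set is a no-op
    rw [List.set_eq_of_length_le (by omega)]
    refine (if_neg ?_).symm
    intro h
    have := congrArg Prod.fst h
    simp at this
    omega

theorem rowlen_pvWriteCell (mz : List (List Char)) (pos : Int × Int) (C : Nat)
    (hC : ∀ l ∈ mz, l.length = C) (hnn : 0 ≤ pos.1 ∧ 0 ≤ pos.2) :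
    ∀ l ∈ pvWriteCell mz pos, l.length = C := by
  intro l hl
  rw [pvWriteCell, PySem.List.pySetD_of_nonneg _ _ hnn.1] at hl
  by_cases hrow : pos.1.toNat < mz.length
  · rcases List.mem_or_eq_of_mem_set hl with h | h
    · exact hC l h
    · subst h
      rw [PySem.List.length_pySetD,
        PySem.List.pyGetD_eq_getElem _ _ hnn.1 (by omega)]
      exact hC _ (List.getElem_mem _)
  · rw [List.set_eq_of_length_le (by omega)] at hl
    exact hC l hl

theorem length_foldl_write (ps : List (Int × Int)) (mz : List (List Char)) :
    (ps.foldl pvWriteCell mz).length = mz.length := by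
  induction ps generalizing mz with
  | nil => rfl
  | cons p ps ih => simp [List.foldl_cons, ih, length_pvWriteCell]

theorem rowlen_foldl_write (ps : List (Int × Int)) (mz : List (List Char)) (C : Nat)
    (hC : ∀ l ∈ mz, l.length = C) (hnn : ∀ p ∈ ps, 0 ≤ p.1 ∧ 0 ≤ p.2) :
    ∀ l ∈ ps.foldl pvWriteCell mz, l.length = C := by
  induction ps generalizing mz with
  | nil => exact hC
  | cons p ps ih =>
    simp only [List.foldl_cons]
    exact ih _ (rowlen_pvWriteCell mz p C hC (hnn p (List.mem_cons_self ..)))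
      (fun q hq => hnn q (List.mem_cons_of_mem _ hq))

-- A's pass over the positions, cell by cell: a cell is open iff its coordinates are a position
theorem get_foldl_write (ps : List (Int × Int)) (mz : List (List Char)) (C : Nat)
    (hC : ∀ l ∈ mz, l.length = C) (hnn : ∀ p ∈ ps, 0 ≤ p.1 ∧ 0 ≤ p.2)
    (i j : Nat) (hi : i < mz.length) (hj : j < C) :
    ((ps.foldl pvWriteCell mz).getD i []).getD j '#' =
      if ((i : Int), (j : Int)) ∈ ps then ' ' else (mz.getD i []).getD j '#' := by
  induction ps generalizing mz with
  | nil => simp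
  | cons p ps ih =>
    have hp := hnn p (List.mem_cons_self ..)
    rw [List.foldl_cons,
      ih _ (rowlen_pvWriteCell mz p C hC hp) (fun q hq => hnn q (List.mem_cons_of_mem _ hq))
        (by rw [length_pvWriteCell]; exact hi),
      get_pvWriteCell mz p C hC hp i j hi hj]
    simp only [List.mem_cons]
    by_cases hmem : ((i : Int), (j : Int)) ∈ ps
    · simp [hmem]
    · by_cases heq : ((i : Int), (j : Int)) = p <;> simp [hmem, heq]

-- A's nested loop over ways is the flat loop over pvPositions
theorem foldA_eq_foldl_positions (ways : List ((Int × Int) × (Int × Int)))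
    (mz : List (List Char)) :
    ways.foldl (fun mz way =>
      let posA := pvCoordToImagepos way.1
      let posB := pvCoordToImagepos way.2
      let posWay := (way.1.1 + way.2.1 + 1, way.1.2 + way.2.2 + 1)
      [posA, posB, posWay].foldl pvWriteCell mz) mz
      = (pvPositions ways).foldl pvWriteCell mz := by
  rw [pvPositions, List.foldl_flatMap]
  rfl

-- B's nested loop over ways is the flat loop over pvPositions
theorem foldB_eq_foldl_positions (ways : List ((Int × Int) × (Int × Int)))
    (h w : Int) (d : PySem.Dict Int (PySem.Set Int)) :
    ways.foldl (fun d way =>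
      [(2 * way.1.1 + 1, 2 * way.1.2 + 1), (2 * way.2.1 + 1, 2 * way.2.2 + 1),
       (way.1.1 + way.2.1 + 1, way.1.2 + way.2.2 + 1)].foldl (pvClipAdd h w) d) d
      = (pvPositions ways).foldl (pvClipAdd h w) d := by
  rw [pvPositions, List.foldl_flatMap]

-- membership in the row dictionary after B's collection pass
theorem mem_getD_clip_fold (h w : Int) (ps : List (Int × Int))
    (d : PySem.Dict Int (PySem.Set Int)) (r c : Int) :
    c ∈ (ps.foldl (pvClipAdd h w) d).getD r PySem.Set.empty ↔
      c ∈ d.getD r PySem.Set.empty ∨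
        ((r, c) ∈ ps ∧ 0 ≤ r ∧ r < h ∧ 0 ≤ c ∧ c < w) := by
  induction ps generalizing d with
  | nil => simp
  | cons p ps ih =>
    rw [List.foldl_cons, ih]
    rw [pvClipAdd]
    split_ifs with hcond
    · rw [PySem.Dict.getD_insert]
      by_cases hr : r = p.1
      · rw [if_pos hr, PySem.Set.mem_add]
        subst hr
        have hB : c = p.2 → (0 ≤ p.1 ∧ p.1 < h ∧ 0 ≤ c ∧ c < w) := by
          rintro rfl
          exact ⟨hcond.1, hcond.2.1, hcond.2.2.1, hcond.2.2.2⟩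
        simp only [List.mem_cons, Prod.ext_iff]
        tauto
      · rw [if_neg hr]
        simp only [List.mem_cons, Prod.ext_iff]
        tauto
    · have himp : (r, c) = p → ¬ (0 ≤ r ∧ r < h ∧ 0 ≤ c ∧ c < w) := by
        rintro rfl hB
        exact hcond ⟨hB.1, hB.2.1, hB.2.2.1, hB.2.2.2⟩
      simp only [List.mem_cons, Prod.ext_iff] at *
      tauto

-- the column set of each row stays duplicate-free
theorem nodup_getD_clip_fold (h w : Int) (ps : List (Int × Int))
    (d : PySem.Dict Int (PySem.Set Int))
    (hd : ∀ r, (d.getD r PySem.Set.empty).Nodup) :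
    ∀ r, ((ps.foldl (pvClipAdd h w) d).getD r PySem.Set.empty).Nodup := by
  induction ps generalizing d with
  | nil => exact hd
  | cons p ps ih =>
    rw [List.foldl_cons]
    refine ih _ ?_
    intro r
    rw [pvClipAdd]
    split_ifs with hcond
    · rw [PySem.Dict.getD_insert]
      split_ifs
      · exact PySem.Set.nodup_add _ _ (hd p.1)
      · exact hd r
    · exact hd r

-- a run-free tail: mapping the wall character over a range is a replicate
theorem map_const_wall (l : List Int) : l.map (fun _ => '#') = List.replicate l.length '#' := by
  induction l with
  | nil => rfl
  | cons x xs ih => simp [ih, List.replicate_succ]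

-- B's run-emission fold renders exactly the membership picture of the sorted column list
theorem runFold_render (w : Int) (cs : List Int) (lo : Int) (acc : List Char)
    (hsort : cs.Pairwise (· < ·)) (hbnd : ∀ c ∈ cs, lo ≤ c ∧ c < w) :
    (cs.foldl pvRunStep (acc, lo)).1 ++
      List.replicate (w - (cs.foldl pvRunStep (acc, lo)).2).toNat '#'
      = acc ++ (PySem.List.pyRange lo w 1).map (fun j => if j ∈ cs then ' ' else '#') := by
  induction cs generalizing lo acc with
  | nil =>
    simp only [List.foldl_nil, List.not_mem_nil, ite_false]
    rw [map_const_wall, PySem.List.length_pyRange_one]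
  | cons c cs ih =>
    have hc := hbnd c (List.mem_cons_self ..)
    have hlt : ∀ x ∈ cs, c < x := fun x hx => (List.pairwise_cons.1 hsort).1 x hx
    rw [List.foldl_cons]
    have hstep : pvRunStep (acc, lo) c = (acc ++ List.replicate (c - lo).toNat '#' ++ [' '], c + 1) := rfl
    rw [hstep]
    rw [ih (c + 1) _ (List.pairwise_cons.1 hsort).2
      (fun x hx => ⟨by have := hlt x hx; omega, (hbnd x (List.mem_cons_of_mem _ hx)).2⟩)]
    rw [PySem.List.pyRange_one_append lo (c + 1) w (by omega) (by omega),
      PySem.List.pyRange_one_succ_right hc.1]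
    have h1 : (PySem.List.pyRange lo c 1).map (fun j => if j ∈ c :: cs then ' ' else '#')
        = List.replicate (c - lo).toNat '#' := by
      rw [List.map_congr_left (g := fun _ => '#') ?_, map_const_wall,
        PySem.List.length_pyRange_one]
      intro j hj
      have hj' := (PySem.List.mem_pyRange_one).1 hj
      have : j ∉ c :: cs := by
        simp only [List.mem_cons]
        rintro (rfl | hmem)
        · omega
        · have := hlt j hmem; omega
      rw [if_neg this]
    have h2 : (PySem.List.pyRange (c + 1) w 1).map (fun j => if j ∈ c :: cs then ' ' else '#')
        = (PySem.List.pyRange (c + 1) w 1).map (fun j => if j ∈ cs then ' ' else '#') := by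
      apply List.map_congr_left
      intro j hj
      have hj' := (PySem.List.mem_pyRange_one).1 hj
      have : (j ∈ c :: cs) ↔ (j ∈ cs) := by
        simp only [List.mem_cons]
        constructor
        · rintro (rfl | hmem)
          · omega
          · exact hmem
        · exact Or.inr
      rw [if_congr this rfl rfl]
    rw [List.map_append, List.map_append, h1, h2]
    simp [List.append_assoc, hc]

theorem print_maze_spec : Claim_equal_print_maze := by
  intro ways rows cols _hDom hPre
  -- inside the natural domain every written position has nonnegative coordinates
  have hnn : ∀ p ∈ pvPositions ways, 0 ≤ p.1 ∧ 0 ≤ p.2 := by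
    intro p hp
    simp only [pvPositions, List.mem_flatMap, List.mem_cons, List.not_mem_nil, or_false] at hp
    obtain ⟨w, hw, hcases⟩ := hp
    have hw' := hPre w hw
    rcases hcases with h | h | h <;> subst h <;> dsimp <;> omega
  unfold Spec_print_maze print_maze print_maze_alt
  simp only []
  rw [foldA_eq_foldl_positions, foldB_eq_foldl_positions]
  set R : Nat := (2 * rows + 1).toNat with hR
  set C : Nat := (2 * cols + 1).toNat with hCdef
  set mz0 : List (List Char) := (List.range R).map (fun _ => List.replicate C '#') with hmz0
  have hlen0 : mz0.length = R := by simp [hmz0]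
  have hC0 : ∀ l ∈ mz0, l.length = C := by
    intro l hl
    rw [hmz0] at hl
    rcases List.mem_map.1 hl with ⟨a, _, rfl⟩
    simp
  set dfin := (pvPositions ways).foldl (pvClipAdd (2 * rows + 1) (2 * cols + 1)) PySem.Dict.empty
    with hdfin
  have hmemdict : ∀ r c : Int, c ∈ dfin.getD r PySem.Set.empty ↔
      ((r, c) ∈ pvPositions ways ∧ 0 ≤ r ∧ r < 2 * rows + 1 ∧ 0 ≤ c ∧ c < 2 * cols + 1) := by
    intro r c
    rw [hdfin, mem_getD_clip_fold]
    simp [PySem.Dict.getD_empty, PySem.Set.empty]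
  have hnddict : ∀ r : Int, (dfin.getD r PySem.Set.empty).Nodup := by
    refine nodup_getD_clip_fold _ _ _ _ ?_
    intro r
    simp [PySem.Dict.getD_empty, PySem.Set.empty]
  -- both sides elementwise
  apply List.ext_getElem
  · simp only [List.length_map, length_foldl_write, hlen0, PySem.List.length_pyRange_one]
    rw [hR]
    omega
  · intro i h1 h2
    have hi : i < R := by rwa [List.length_map, length_foldl_write, hlen0] at h1
    set F := (pvPositions ways).foldl pvWriteCell mz0 with hF
    have hgi : i < F.length := by rw [hF, length_foldl_write, hlen0]; exact hi
    have hrowlen : ∀ l ∈ F, l.length = C := rowlen_foldl_write (pvPositions ways) mz0 C hC0 hnn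
    simp only [List.getElem_map]
    rw [PySem.List.getElem_pyRange_one]
    simp only [zero_add]
    -- the sorted open-column list of row i
    set cs := PySem.List.sorted (dfin.getD ((i : Nat) : Int) PySem.Set.empty) (fun x => x) false
      with hcs
    have hcsmem : ∀ c : Int, c ∈ cs ↔
        ((((i : Nat) : Int), c) ∈ pvPositions ways ∧ 0 ≤ ((i : Nat) : Int) ∧
          ((i : Nat) : Int) < 2 * rows + 1 ∧ 0 ≤ c ∧ c < 2 * cols + 1) := by
      intro c
      rw [hcs, PySem.List.mem_sorted, hmemdict]
    have hcsnd : cs.Nodup := by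
      rw [hcs]
      exact (PySem.List.sorted_perm _ _ _).symm.nodup (hnddict _)
    have hcssort : cs.Pairwise (· < ·) := by
      have h1 := PySem.List.sorted_pairwise (dfin.getD ((i : Nat) : Int) PySem.Set.empty)
        (fun x => x)
      have := (h1.and hcsnd)
      exact this.imp (fun h => lt_of_le_of_ne h.1 h.2)
    have hcsbnd : ∀ c ∈ cs, (0 : Int) ≤ c ∧ c < 2 * cols + 1 := by
      intro c hc
      have := (hcsmem c).1 hc
      exact ⟨this.2.2.2.1, this.2.2.2.2⟩
    have hrender := runFold_render (2 * cols + 1) cs 0 [] hcssort hcsbnd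
    rw [hrender]
    simp only [List.nil_append]
    congr 1
    -- compare the two char lists elementwise
    apply List.ext_getElem
    · rw [hrowlen _ (List.getElem_mem _)]
      simp only [List.length_map, PySem.List.length_pyRange_one]
      rw [hCdef]
      omega
    · intro j hj1 hj2
      have hjC : j < C := by rwa [hrowlen _ (List.getElem_mem _)] at hj1
      have key := get_foldl_write (pvPositions ways) mz0 C hC0 hnn i j (by rw [hlen0]; exact hi) hjC
      have e1 : F.getD i [] = F[i]'hgi := by
        rw [List.getD_eq_getElem?_getD, List.getElem?_eq_getElem hgi, Option.getD_some]
      have e2 : (F[i]'hgi).getD j '#' = (F[i]'hgi)[j]'hj1 := by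
        rw [List.getD_eq_getElem?_getD, List.getElem?_eq_getElem hj1, Option.getD_some]
      rw [e1, e2] at key
      have hrow0 : mz0.getD i [] = List.replicate C '#' := by
        have hi' : i < mz0.length := by rw [hlen0]; exact hi
        rw [List.getD_eq_getElem?_getD, List.getElem?_eq_getElem hi', Option.getD_some]
        simp [hmz0]
      have hmz0get : (mz0.getD i []).getD j '#' = '#' := by
        rw [hrow0, List.getD_eq_getElem?_getD, List.getElem?_replicate, if_pos hjC,
          Option.getD_some]
      rw [hmz0get] at key
      rw [key]
      simp only [List.getElem_map]
      rw [PySem.List.getElem_pyRange_one]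
      simp only [zero_add]
      refine if_congr ?_ rfl rfl
      rw [hcsmem]
      constructor
      · intro h
        exact ⟨h, by omega, by omega, by omega, by omega⟩
      · intro h
        exact h.1
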